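-- pv_equiv track=rewrite | github.com/iKozay/TrackMyDegree | Back-End/python_utils/utils/concordia_api_utils.py | format_course_schedule_response
-- ===== SOURCE A (Python) =====
-- def format_course_schedule_response(response):
--     if not response:
--         return []
--
--     formatted_courses = []
--     for course in response:
--         formatted_course = {
--             "courseID": course.get("Course ID", "").zfill(6),  # Pad with leading zeros to 6 digits
--             "termCode": course.get("Term Code", ""),
--             "session": course.get("Session", ""),
--             "subject": course.get("Subject", ""),
--             "catalog": course.get("Catalog Nbr", ""),
--             "section": course.get("Section", ""),
--             "componentCode": course.get("Component Code", ""),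
--             "componentDescription": course.get("Component Descr", ""),
--             "classNumber": course.get("Class Nbr", ""),
--             "classAssociation": course.get("Class Association", ""),
--             "courseTitle": course.get("Course Title", ""),
--             "topicID": course.get("Topic ID", ""),
--             "topicDescription": course.get("Topic Descr", ""),
--             "classStatus": course.get("Class Status", ""),
--             "locationCode": course.get("Location Code", ""),
--             "instructionModeCode": course.get("Instruction Mode code", ""),
--             "instructionModeDescription": course.get("Instruction Mode Descr", ""),
--             "meetingPatternNumber": course.get("Meeting Pattern Nbr", ""),
--             "roomCode": course.get("Room Code", ""),
--             "buildingCode": course.get("Building Code", ""),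
--             "room": course.get("Room", ""),
--             "classStartTime": course.get("Class Start Time", ""),
--             "classEndTime": course.get("Class End Time", ""),
--             "modays": course.get("Mon", ""),
--             "tuesdays": course.get("Tues", ""),
--             "wednesdays": course.get("Wed", ""),
--             "thursdays": course.get("Thurs", ""),
--             "fridays": course.get("Fri", ""),
--             "saturdays": course.get("Sat", ""),
--             "sundays": course.get("Sun", ""),
--             "classStartDate": course.get("Start Date (DD/MM/YYYY)", ""),
--             "classEndDate": course.get("End Date (DD/MM/YYYY)", ""),
--             "career": course.get("Career", ""),
--             "departmentCode": course.get("Dept. Code", ""),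
--             "departmentDescription": course.get("Dept. Descr", ""),
--             "facultyCode": course.get("Faculty Code", ""),
--             "facultyDescription": course.get("Faculty Descr", ""),
--             "enrollmentCapacity": course.get("Enrollment Capacity", ""),
--             "currentEnrollment": course.get("Current Enrollment", ""),
--             "waitlistCapacity": course.get("Waitlist Capacity", ""),
--             "currentWaitlistTotal": course.get("Current Waitlist Total", ""),
--             "hasSeatReserved": course.get("Has some/all seats reserved?", "")
--         }
--         formatted_courses.append(formatted_course)
--
--     return formatted_courses
-- ===== SOURCE B (Python) =====
-- FIELDS = [
--     ("courseID", "Course ID"),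
--     ("termCode", "Term Code"),
--     ("session", "Session"),
--     ("subject", "Subject"),
--     ("catalog", "Catalog Nbr"),
--     ("section", "Section"),
--     ("componentCode", "Component Code"),
--     ("componentDescription", "Component Descr"),
--     ("classNumber", "Class Nbr"),
--     ("classAssociation", "Class Association"),
--     ("courseTitle", "Course Title"),
--     ("topicID", "Topic ID"),
--     ("topicDescription", "Topic Descr"),
--     ("classStatus", "Class Status"),
--     ("locationCode", "Location Code"),
--     ("instructionModeCode", "Instruction Mode code"),
--     ("instructionModeDescription", "Instruction Mode Descr"),
--     ("meetingPatternNumber", "Meeting Pattern Nbr"),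
--     ("roomCode", "Room Code"),
--     ("buildingCode", "Building Code"),
--     ("room", "Room"),
--     ("classStartTime", "Class Start Time"),
--     ("classEndTime", "Class End Time"),
--     ("modays", "Mon"),
--     ("tuesdays", "Tues"),
--     ("wednesdays", "Wed"),
--     ("thursdays", "Thurs"),
--     ("fridays", "Fri"),
--     ("saturdays", "Sat"),
--     ("sundays", "Sun"),
--     ("classStartDate", "Start Date (DD/MM/YYYY)"),
--     ("classEndDate", "End Date (DD/MM/YYYY)"),
--     ("career", "Career"),
--     ("departmentCode", "Dept. Code"),
--     ("departmentDescription", "Dept. Descr"),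
--     ("facultyCode", "Faculty Code"),
--     ("facultyDescription", "Faculty Descr"),
--     ("enrollmentCapacity", "Enrollment Capacity"),
--     ("currentEnrollment", "Current Enrollment"),
--     ("waitlistCapacity", "Waitlist Capacity"),
--     ("currentWaitlistTotal", "Current Waitlist Total"),
--     ("hasSeatReserved", "Has some/all seats reserved?"),
-- ]
--
--
-- def format_course_schedule_response(response):
--     # Column-wise (field-major) construction: build one whole column per output
--     # field, zero-padding the courseID column once, then transpose the columns
--     # back into one dict per course.  An empty response yields no rows.
--     columns = []
--     for out_key, in_key in FIELDS:
--         col = [course.get(in_key, "") for course in response]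
--         if out_key == "courseID":
--             col = [v.zfill(6) for v in col]
--         columns.append((out_key, col))
--     return [{key: col[i] for key, col in columns} for i in range(len(response))]
-- ===== Notes on version B (the rewrite author's own statement) =====
-- stated objective: alternative
-- what changed: B builds the result field-major: one full column of values per output field (zero-padding the courseID column once), then transposes the columns into per-course dicts, instead of A's course-major loop writing 42 dict entries per course.
import Mathlib
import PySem

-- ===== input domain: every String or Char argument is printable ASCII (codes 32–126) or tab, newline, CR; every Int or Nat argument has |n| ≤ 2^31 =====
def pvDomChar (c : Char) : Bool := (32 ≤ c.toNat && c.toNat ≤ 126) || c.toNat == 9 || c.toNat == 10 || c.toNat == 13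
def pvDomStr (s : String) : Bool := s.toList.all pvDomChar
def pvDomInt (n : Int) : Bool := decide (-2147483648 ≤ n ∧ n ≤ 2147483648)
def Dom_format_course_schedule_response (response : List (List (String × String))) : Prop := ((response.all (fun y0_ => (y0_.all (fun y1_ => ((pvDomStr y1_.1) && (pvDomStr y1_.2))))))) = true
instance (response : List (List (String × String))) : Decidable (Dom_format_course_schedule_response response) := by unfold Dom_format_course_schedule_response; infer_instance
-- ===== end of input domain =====

-- B builds the result field-major (one value column per output field, courseID column zero-padded once,
-- then a transpose back into per-course dicts) instead of A's course-major loop; objective: alternative.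
-- ===== PORT A =====
-- port of Python dict.get(k, "") on the assoc-list dict (first match, per the type convention)
def pvGetStr (course : List (String × String)) (k : String) : String :=
  (((course.find? (fun p => p.1 == k)).map (fun p => p.2)).getD "")

def format_course_schedule_response (response : List (List (String × String))) : List (List (String × String)) :=
  if response.isEmpty then []
  else
    response.foldl (fun formatted_courses course =>
      formatted_courses ++ [[
      ("courseID", PySem.Str.zfill (pvGetStr course "Course ID") 6),
      ("termCode", pvGetStr course "Term Code"),
      ("session", pvGetStr course "Session"),
      ("subject", pvGetStr course "Subject"),
      ("catalog", pvGetStr course "Catalog Nbr"),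
      ("section", pvGetStr course "Section"),
      ("componentCode", pvGetStr course "Component Code"),
      ("componentDescription", pvGetStr course "Component Descr"),
      ("classNumber", pvGetStr course "Class Nbr"),
      ("classAssociation", pvGetStr course "Class Association"),
      ("courseTitle", pvGetStr course "Course Title"),
      ("topicID", pvGetStr course "Topic ID"),
      ("topicDescription", pvGetStr course "Topic Descr"),
      ("classStatus", pvGetStr course "Class Status"),
      ("locationCode", pvGetStr course "Location Code"),
      ("instructionModeCode", pvGetStr course "Instruction Mode code"),
      ("instructionModeDescription", pvGetStr course "Instruction Mode Descr"),
      ("meetingPatternNumber", pvGetStr course "Meeting Pattern Nbr"),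
      ("roomCode", pvGetStr course "Room Code"),
      ("buildingCode", pvGetStr course "Building Code"),
      ("room", pvGetStr course "Room"),
      ("classStartTime", pvGetStr course "Class Start Time"),
      ("classEndTime", pvGetStr course "Class End Time"),
      ("modays", pvGetStr course "Mon"),
      ("tuesdays", pvGetStr course "Tues"),
      ("wednesdays", pvGetStr course "Wed"),
      ("thursdays", pvGetStr course "Thurs"),
      ("fridays", pvGetStr course "Fri"),
      ("saturdays", pvGetStr course "Sat"),
      ("sundays", pvGetStr course "Sun"),
      ("classStartDate", pvGetStr course "Start Date (DD/MM/YYYY)"),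
      ("classEndDate", pvGetStr course "End Date (DD/MM/YYYY)"),
      ("career", pvGetStr course "Career"),
      ("departmentCode", pvGetStr course "Dept. Code"),
      ("departmentDescription", pvGetStr course "Dept. Descr"),
      ("facultyCode", pvGetStr course "Faculty Code"),
      ("facultyDescription", pvGetStr course "Faculty Descr"),
      ("enrollmentCapacity", pvGetStr course "Enrollment Capacity"),
      ("currentEnrollment", pvGetStr course "Current Enrollment"),
      ("waitlistCapacity", pvGetStr course "Waitlist Capacity"),
      ("currentWaitlistTotal", pvGetStr course "Current Waitlist Total"),
      ("hasSeatReserved", pvGetStr course "Has some/all seats reserved?")]]) []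

-- ===== PORT B =====
def pvFields : List (String × String) := [
    ("courseID", "Course ID"),
    ("termCode", "Term Code"),
    ("session", "Session"),
    ("subject", "Subject"),
    ("catalog", "Catalog Nbr"),
    ("section", "Section"),
    ("componentCode", "Component Code"),
    ("componentDescription", "Component Descr"),
    ("classNumber", "Class Nbr"),
    ("classAssociation", "Class Association"),
    ("courseTitle", "Course Title"),
    ("topicID", "Topic ID"),
    ("topicDescription", "Topic Descr"),
    ("classStatus", "Class Status"),
    ("locationCode", "Location Code"),
    ("instructionModeCode", "Instruction Mode code"),
    ("instructionModeDescription", "Instruction Mode Descr"),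
    ("meetingPatternNumber", "Meeting Pattern Nbr"),
    ("roomCode", "Room Code"),
    ("buildingCode", "Building Code"),
    ("room", "Room"),
    ("classStartTime", "Class Start Time"),
    ("classEndTime", "Class End Time"),
    ("modays", "Mon"),
    ("tuesdays", "Tues"),
    ("wednesdays", "Wed"),
    ("thursdays", "Thurs"),
    ("fridays", "Fri"),
    ("saturdays", "Sat"),
    ("sundays", "Sun"),
    ("classStartDate", "Start Date (DD/MM/YYYY)"),
    ("classEndDate", "End Date (DD/MM/YYYY)"),
    ("career", "Career"),
    ("departmentCode", "Dept. Code"),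
    ("departmentDescription", "Dept. Descr"),
    ("facultyCode", "Faculty Code"),
    ("facultyDescription", "Faculty Descr"),
    ("enrollmentCapacity", "Enrollment Capacity"),
    ("currentEnrollment", "Current Enrollment"),
    ("waitlistCapacity", "Waitlist Capacity"),
    ("currentWaitlistTotal", "Current Waitlist Total"),
    ("hasSeatReserved", "Has some/all seats reserved?")]

def format_course_schedule_response_alt (response : List (List (String × String))) : List (List (String × String)) :=
  -- columns: one (output_key, value column) pair per field; courseID's column zero-padded once
  let columns := pvFields.foldl (fun cols p =>
    let col := response.map (fun course => pvGetStr course p.2)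
    let col := if p.1 == "courseID" then col.map (fun v => PySem.Str.zfill v 6) else col
    cols ++ [(p.1, col)]) []
  -- transpose: [{key: col[i] for key, col in columns} for i in range(len(response))]
  -- col[i] ported as pyGetD: each column has length len(response), so i is always in range
  (PySem.List.pyRange 0 (response.length : Int) 1).map (fun i =>
    columns.map (fun kc => (kc.1, PySem.List.pyGetD kc.2 i "")))

-- ===== PRECONDITION & SPEC =====
def Spec_format_course_schedule_response (response : List (List (String × String))) (out : List (List (String × String))) : Prop := out = format_course_schedule_response_alt response
instance (response : List (List (String × String))) (out : List (List (String × String))) : Decidable (Spec_format_course_schedule_response response out) := by unfold Spec_format_course_schedule_response; infer_instance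

-- ===== CLAIM =====
def Claim_equal_format_course_schedule_response : Prop := ∀ (response : List (List (String × String))), Dom_format_course_schedule_response response → Spec_format_course_schedule_response response (format_course_schedule_response response)

-- ===== LEMMAS AND PROOFS =====
-- the per-course row A builds, as a function of the course (A's foldl appends exactly these rows)
def pvRowA (course : List (String × String)) : List (String × String) :=
  pvFields.map (fun p => (p.1, if p.1 == "courseID" then PySem.Str.zfill (pvGetStr course p.2) 6 else pvGetStr course p.2))

theorem rowA_eq (course : List (String × String)) :
    [("courseID", PySem.Str.zfill (pvGetStr course "Course ID") 6),
      ("termCode", pvGetStr course "Term Code"),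
      ("session", pvGetStr course "Session"),
      ("subject", pvGetStr course "Subject"),
      ("catalog", pvGetStr course "Catalog Nbr"),
      ("section", pvGetStr course "Section"),
      ("componentCode", pvGetStr course "Component Code"),
      ("componentDescription", pvGetStr course "Component Descr"),
      ("classNumber", pvGetStr course "Class Nbr"),
      ("classAssociation", pvGetStr course "Class Association"),
      ("courseTitle", pvGetStr course "Course Title"),
      ("topicID", pvGetStr course "Topic ID"),
      ("topicDescription", pvGetStr course "Topic Descr"),
      ("classStatus", pvGetStr course "Class Status"),
      ("locationCode", pvGetStr course "Location Code"),
      ("instructionModeCode", pvGetStr course "Instruction Mode code"),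
      ("instructionModeDescription", pvGetStr course "Instruction Mode Descr"),
      ("meetingPatternNumber", pvGetStr course "Meeting Pattern Nbr"),
      ("roomCode", pvGetStr course "Room Code"),
      ("buildingCode", pvGetStr course "Building Code"),
      ("room", pvGetStr course "Room"),
      ("classStartTime", pvGetStr course "Class Start Time"),
      ("classEndTime", pvGetStr course "Class End Time"),
      ("modays", pvGetStr course "Mon"),
      ("tuesdays", pvGetStr course "Tues"),
      ("wednesdays", pvGetStr course "Wed"),
      ("thursdays", pvGetStr course "Thurs"),
      ("fridays", pvGetStr course "Fri"),
      ("saturdays", pvGetStr course "Sat"),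
      ("sundays", pvGetStr course "Sun"),
      ("classStartDate", pvGetStr course "Start Date (DD/MM/YYYY)"),
      ("classEndDate", pvGetStr course "End Date (DD/MM/YYYY)"),
      ("career", pvGetStr course "Career"),
      ("departmentCode", pvGetStr course "Dept. Code"),
      ("departmentDescription", pvGetStr course "Dept. Descr"),
      ("facultyCode", pvGetStr course "Faculty Code"),
      ("facultyDescription", pvGetStr course "Faculty Descr"),
      ("enrollmentCapacity", pvGetStr course "Enrollment Capacity"),
      ("currentEnrollment", pvGetStr course "Current Enrollment"),
      ("waitlistCapacity", pvGetStr course "Waitlist Capacity"),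
      ("currentWaitlistTotal", pvGetStr course "Current Waitlist Total"),
      ("hasSeatReserved", pvGetStr course "Has some/all seats reserved?")] = pvRowA course := by
  simp [pvRowA, pvFields]

-- A is the course-major map of pvRowA
theorem portA_eq_map (response : List (List (String × String))) :
    format_course_schedule_response response = response.map pvRowA := by
  unfold format_course_schedule_response
  split
  · rename_i h
    simp_all [List.isEmpty_iff]
  · simp only [rowA_eq]
    simpa using PySem.List.foldl_append_singleton_eq_map pvRowA response []

-- the column B builds for field p
def pvColB (response : List (List (String × String))) (p : String × String) : String × List String :=
  (p.1, if p.1 == "courseID"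
    then (response.map (fun course => pvGetStr course p.2)).map (fun v => PySem.Str.zfill v 6)
    else response.map (fun course => pvGetStr course p.2))

theorem columns_eq (response : List (List (String × String)))
    (l : List (String × String)) (acc : List (String × List String)) :
    l.foldl (fun cols p =>
      let col := response.map (fun course => pvGetStr course p.2)
      let col := if p.1 == "courseID" then col.map (fun v => PySem.Str.zfill v 6) else col
      cols ++ [(p.1, col)]) acc = acc ++ l.map (pvColB response) := by
  induction l generalizing acc with
  | nil => simp
  | cons p l ih =>
    rw [List.foldl_cons, ih]
    simp [pvColB]

-- B's transposed row i equals pvRowA of course i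
theorem portB_eq_map (response : List (List (String × String))) :
    format_course_schedule_response_alt response = response.map pvRowA := by
  unfold format_course_schedule_response_alt
  rw [columns_eq]
  rw [PySem.List.pyRange_zero_natCast]
  rw [List.map_map]
  apply List.ext_getElem
  · simp
  · intro i h1 h2
    simp only [List.getElem_map, List.getElem_range, Function.comp]
    simp only [List.nil_append, List.map_map, pvRowA]
    apply List.map_congr_left
    intro p _
    simp only [Function.comp, pvColB]
    congr 1
    split
    · simp [PySem.List.pyGetD_natCast, List.getD, List.getElem?_map,
        List.getElem?_eq_getElem (by simpa using h2)]
    · simp [PySem.List.pyGetD_natCast, List.getD,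
        List.getElem?_eq_getElem (by simpa using h2)]

-- ===== VERDICT =====
theorem format_course_schedule_response_spec : Claim_equal_format_course_schedule_response := by
  intro response _
  unfold Spec_format_course_schedule_response
  rw [portA_eq_map, portB_eq_map]
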